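-- pv_equiv track=rewrite | github.com/labowitz/dimerization_network_expressivity | dimer_network_utilities.py | make_Kij_names
-- ===== SOURCE A (Python) =====
-- import itertools
--
-- def make_Kij_names(m, n_input = 2, rxn_ordered = True):
--     """
--     Create Kij names for ordering parameters
--     """
--     n_accesory = m - n_input
--     if rxn_ordered:
--         return [f'K_{i[0]}_{i[1]}' for i in itertools.combinations_with_replacement(range(1, m+1), 2)]
--     else:
--         names = []
--         #add input homodimers
--         names.extend([f'K_{i}_{i}' for i in range(1, n_input+1)])
--         #add input heterodimers
--         names.extend([f'K_{i[0]}_{i[1]}' for i in itertools.combinations(range(1, n_input+1), 2)])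
--         #add input-acc heterodimers
--         names.extend([f'K_{i[0]}_{i[1]}' for i in itertools.product(range(1, n_input+1),
--                                                                   range(n_input+1, n_input+n_accesory+1))])
--         #add accessory homodimers
--         names.extend([f'K_{i}_{i}' for i in range(n_input+1, n_input+n_accesory+1)])
--         #add accessory heterodimers
--         names.extend([f'K_{i[0]}_{i[1]}' for i in itertools.combinations(range(n_input+1, n_input+n_accesory+1), 2)])
--
--         return names
-- ===== SOURCE B (Python) =====
-- def make_Kij_names(m, n_input = 2, rxn_ordered = True):
--     """
--     Create Kij names for ordering parameters
--     """
--     if rxn_ordered: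
--         return [f'K_{i}_{j}' for i in range(1, m + 1) for j in range(i, m + 1)]
--     # one pass over ordered pairs i <= j, classified into five buckets
--     in_homo, in_het, in_acc, acc_homo, acc_het = [], [], [], [], []
--     for i in range(1, m + 1):
--         for j in range(i, m + 1):
--             s = f'K_{i}_{j}'
--             if j <= n_input:
--                 (in_homo if i == j else in_het).append(s)
--             elif i <= n_input:
--                 in_acc.append(s)
--             else:
--                 (acc_homo if i == j else acc_het).append(s)
--     return in_homo + in_het + in_acc + acc_homo + acc_het
-- ===== Notes on version B (the rewrite author's own statement) =====
-- stated objective: alternative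
-- what changed: Replaces the five separate itertools enumerations with a single pass over ordered pairs i<=j in 1..m that classifies each pair into five buckets and concatenates them; Pre_ excludes negative n_input on the unordered branch, where n_input is not a valid count of input species and A names fictitious species with indices <= 0.
-- intended difference: On the unordered branch with 1 <= n_input and m < n_input (more declared input species than total species m), A still returns dimer names for input species beyond m (e.g. K_2_2 when m=1), while B names only dimers of the m existing species, which is the intended value. — e.g. on make_Kij_names(1, 2, false): A returns ["K_1_1", "K_2_2", "K_1_2"], B returns ["K_1_1"]
-- outside the precondition, e.g. on make_Kij_names(0, -1, False): A returns ['K_0_0'], B returns []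
import Mathlib
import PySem

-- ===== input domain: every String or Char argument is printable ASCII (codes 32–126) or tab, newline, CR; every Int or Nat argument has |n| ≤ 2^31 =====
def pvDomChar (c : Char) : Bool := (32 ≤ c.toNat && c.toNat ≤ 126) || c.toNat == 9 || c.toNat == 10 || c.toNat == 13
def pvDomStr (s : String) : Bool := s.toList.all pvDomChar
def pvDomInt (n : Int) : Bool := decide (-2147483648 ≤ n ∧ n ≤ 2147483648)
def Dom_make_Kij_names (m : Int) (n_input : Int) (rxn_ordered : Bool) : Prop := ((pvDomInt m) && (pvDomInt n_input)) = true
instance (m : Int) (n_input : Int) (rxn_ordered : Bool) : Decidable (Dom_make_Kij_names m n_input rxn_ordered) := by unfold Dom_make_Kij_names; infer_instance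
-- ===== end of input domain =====

-- B replaces A's five separate itertools enumerations by ONE classifying pass over ordered
-- pairs i ≤ j in 1..m (alternative decomposition, same asymptotic cost).

-- ===== PORT A =====
-- f'K_{i}_{j}'
def pvName (i j : Int) : String := "K_" ++ PySem.Int.toStr i ++ "_" ++ PySem.Int.toStr j

-- itertools.combinations_with_replacement(l, 2)
def pvCwr2 : List Int → List (Int × Int)
  | [] => []
  | x :: xs => (x :: xs).map (fun y => (x, y)) ++ pvCwr2 xs

-- itertools.combinations(l, 2)
def pvComb2 : List Int → List (Int × Int)
  | [] => []
  | x :: xs => xs.map (fun y => (x, y)) ++ pvComb2 xs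

-- itertools.product(l1, l2)
def pvProd2 (l1 l2 : List Int) : List (Int × Int) :=
  l1.flatMap (fun a => l2.map (fun b => (a, b)))

def make_Kij_names (m : Int) (n_input : Int) (rxn_ordered : Bool) : List String :=
  let n_accesory := m - n_input
  if rxn_ordered then
    (pvCwr2 (PySem.List.pyRange 1 (m + 1) 1)).map (fun p => pvName p.1 p.2)
  else
    ((PySem.List.pyRange 1 (n_input + 1) 1).map (fun i => pvName i i))
    ++ ((pvComb2 (PySem.List.pyRange 1 (n_input + 1) 1)).map (fun p => pvName p.1 p.2))
    ++ ((pvProd2 (PySem.List.pyRange 1 (n_input + 1) 1)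
          (PySem.List.pyRange (n_input + 1) (n_input + n_accesory + 1) 1)).map (fun p => pvName p.1 p.2))
    ++ ((PySem.List.pyRange (n_input + 1) (n_input + n_accesory + 1) 1).map (fun i => pvName i i))
    ++ ((pvComb2 (PySem.List.pyRange (n_input + 1) (n_input + n_accesory + 1) 1)).map (fun p => pvName p.1 p.2))

-- ===== PORT B =====
-- loop body: append f'K_{i}_{j}' to the bucket the pair (i, j) is classified into
def pvStep (n_input : Int)
    (s : List String × List String × List String × List String × List String)
    (i j : Int) : List String × List String × List String × List String × List String :=
  let nm := pvName i j
  if j ≤ n_input then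
    if i = j then (s.1 ++ [nm], s.2.1, s.2.2.1, s.2.2.2.1, s.2.2.2.2)
    else (s.1, s.2.1 ++ [nm], s.2.2.1, s.2.2.2.1, s.2.2.2.2)
  else if i ≤ n_input then (s.1, s.2.1, s.2.2.1 ++ [nm], s.2.2.2.1, s.2.2.2.2)
  else if i = j then (s.1, s.2.1, s.2.2.1, s.2.2.2.1 ++ [nm], s.2.2.2.2)
  else (s.1, s.2.1, s.2.2.1, s.2.2.2.1, s.2.2.2.2 ++ [nm])

def make_Kij_names_alt (m : Int) (n_input : Int) (rxn_ordered : Bool) : List String :=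
  if rxn_ordered then
    (PySem.List.pyRange 1 (m + 1) 1).flatMap
      (fun i => (PySem.List.pyRange i (m + 1) 1).map (fun j => pvName i j))
  else
    let st := (PySem.List.pyRange 1 (m + 1) 1).foldl
      (fun s i => (PySem.List.pyRange i (m + 1) 1).foldl (fun s j => pvStep n_input s i j) s)
      ([], [], [], [], [])
    st.1 ++ st.2.1 ++ st.2.2.1 ++ st.2.2.2.1 ++ st.2.2.2.2

-- ===== PRECONDITION & SPEC =====
-- Pre_ restricts the unordered branch to the natural domain where n_input is a count:
-- for negative n_input A still returns a list, but it names fictitious species with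
-- indices ≤ 0, which B's enumeration of the m species does not produce.
def Pre_make_Kij_names (m : Int) (n_input : Int) (rxn_ordered : Bool) : Prop :=
  rxn_ordered = true ∨ 0 ≤ n_input
instance (m : Int) (n_input : Int) (rxn_ordered : Bool) : Decidable (Pre_make_Kij_names m n_input rxn_ordered) := by
  unfold Pre_make_Kij_names; infer_instance

def pvWitness_make_Kij_names : Int × Int × Bool := (4, 2, false)

-- On the unordered branch with 1 ≤ n_input and m < n_input (more declared input species
-- than total species m), A still returns dimer names for input species beyond m, while B
-- names only dimers of the m existing species, which is the intended value.
def D_make_Kij_names (m : Int) (n_input : Int) (rxn_ordered : Bool) : Prop :=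
  rxn_ordered = false ∧ 1 ≤ n_input ∧ m < n_input
instance (m : Int) (n_input : Int) (rxn_ordered : Bool) : Decidable (D_make_Kij_names m n_input rxn_ordered) := by
  unfold D_make_Kij_names; infer_instance

def Spec_make_Kij_names (m : Int) (n_input : Int) (rxn_ordered : Bool) (out : List String) : Prop := ¬ D_make_Kij_names m n_input rxn_ordered → out = make_Kij_names_alt m n_input rxn_ordered
instance (m : Int) (n_input : Int) (rxn_ordered : Bool) (out : List String) : Decidable (Spec_make_Kij_names m n_input rxn_ordered out) := by unfold Spec_make_Kij_names; infer_instance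

def pvDiffWitness_make_Kij_names : Int × Int × Bool := (1, 2, false)
def pvDiffWitnessOut_make_Kij_names : (List String) × (List String) :=
  (["K_1_1", "K_2_2", "K_1_2"], ["K_1_1"])

-- ===== CLAIM (what is proved, stated in full; the proofs are below) =====
def Claim_unchanged_make_Kij_names : Prop := ∀ (m : Int) (n_input : Int) (rxn_ordered : Bool), Dom_make_Kij_names m n_input rxn_ordered → Pre_make_Kij_names m n_input rxn_ordered → Spec_make_Kij_names m n_input rxn_ordered (make_Kij_names m n_input rxn_ordered)
def Claim_changed_make_Kij_names : Prop := Dom_make_Kij_names (pvDiffWitness_make_Kij_names.1) (pvDiffWitness_make_Kij_names.2.1) (pvDiffWitness_make_Kij_names.2.2) ∧ Pre_make_Kij_names (pvDiffWitness_make_Kij_names.1) (pvDiffWitness_make_Kij_names.2.1) (pvDiffWitness_make_Kij_names.2.2) ∧ D_make_Kij_names (pvDiffWitness_make_Kij_names.1) (pvDiffWitness_make_Kij_names.2.1) (pvDiffWitness_make_Kij_names.2.2) ∧ make_Kij_names (pvDiffWitness_make_Kij_names.1) (pvDiffWitness_make_Kij_names.2.1) (pvDiffWitness_make_Kij_names.2.2)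 = pvDiffWitnessOut_make_Kij_names.1 ∧ make_Kij_names_alt (pvDiffWitness_make_Kij_names.1) (pvDiffWitness_make_Kij_names.2.1) (pvDiffWitness_make_Kij_names.2.2) = pvDiffWitnessOut_make_Kij_names.2 ∧ pvDiffWitnessOut_make_Kij_names.1 ≠ pvDiffWitnessOut_make_Kij_names.2

-- ===== LEMMAS AND PROOFS =====

-- abbreviation used only in the proofs
def pvR (a b : Int) : List Int := PySem.List.pyRange a b 1

theorem pvR_cons {a b : Int} (h : a < b) : pvR a b = a :: pvR (a + 1) b :=
  PySem.List.pyRange_one_cons h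

theorem pvR_nil {a b : Int} (h : b ≤ a) : pvR a b = [] :=
  PySem.List.pyRange_one_eq_nil h

theorem mem_pvR {x a b : Int} : x ∈ pvR a b ↔ a ≤ x ∧ x < b :=
  PySem.List.mem_pyRange_one

-- folding over a flatMap = the nested loop
theorem pv_foldl_flatMap {α β σ : Type} (l : List α) (g : α → List β) (f : σ → β → σ)
    (init : σ) : (l.flatMap g).foldl f init = l.foldl (fun s x => (g x).foldl f s) init := by
  induction l generalizing init with
  | nil => rfl
  | cons x xs ih => simp [List.flatMap_cons, List.foldl_append, ih]

-- filter distributes over flatMap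
theorem pv_filter_flatMap {α β : Type} (l : List α) (g : α → List β) (p : β → Bool) :
    (l.flatMap g).filter p = l.flatMap (fun x => (g x).filter p) := by
  induction l with
  | nil => rfl
  | cons x xs ih => simp [List.flatMap_cons, List.filter_append, ih]

theorem pv_flatMap_congr {α β : Type} {l : List α} {f g : α → List β}
    (h : ∀ x ∈ l, f x = g x) : l.flatMap f = l.flatMap g := by
  induction l with
  | nil => rfl
  | cons x xs ih =>
    simp only [List.flatMap_cons]
    rw [h x (by simp), ih (fun y hy => h y (by simp [hy]))]

-- the five bucket predicates (pair form of pvStep's branches)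
def pvQ1 (c : Int) (p : Int × Int) : Bool := decide (p.2 ≤ c ∧ p.1 = p.2)
def pvQ2 (c : Int) (p : Int × Int) : Bool := decide (p.2 ≤ c ∧ ¬ p.1 = p.2)
def pvQ3 (c : Int) (p : Int × Int) : Bool := decide (¬ p.2 ≤ c ∧ p.1 ≤ c)
def pvQ4 (c : Int) (p : Int × Int) : Bool := decide (¬ p.2 ≤ c ∧ ¬ p.1 ≤ c ∧ p.1 = p.2)
def pvQ5 (c : Int) (p : Int × Int) : Bool := decide (¬ p.2 ≤ c ∧ ¬ p.1 ≤ c ∧ ¬ p.1 = p.2)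

def pvF (p : Int × Int) : String := pvName p.1 p.2

-- all ordered pairs i ≤ j with 1 ≤ i, j ≤ n (the pairs B's double loop visits, in order)
def pvAll (n : Int) : List (Int × Int) :=
  (pvR 1 (n + 1)).flatMap (fun i => (pvR i (n + 1)).map (fun j => (i, j)))

-- the classifying fold computes the five filtered buckets
theorem pv_foldl5 (c : Int) (l : List (Int × Int))
    (s : List String × List String × List String × List String × List String) :
    l.foldl (fun s p => pvStep c s p.1 p.2) s =
      (s.1 ++ (l.filter (pvQ1 c)).map pvF, s.2.1 ++ (l.filter (pvQ2 c)).map pvF,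
       s.2.2.1 ++ (l.filter (pvQ3 c)).map pvF, s.2.2.2.1 ++ (l.filter (pvQ4 c)).map pvF,
       s.2.2.2.2 ++ (l.filter (pvQ5 c)).map pvF) := by
  induction l generalizing s with
  | nil => simp
  | cons x xs ih =>
    rw [List.foldl_cons, ih]
    by_cases h1 : x.2 ≤ c <;> by_cases h2 : x.1 = x.2 <;> by_cases h3 : x.1 ≤ c <;>
      simp [pvStep, pvQ1, pvQ2, pvQ3, pvQ4, pvQ5, pvF, h1, h2, h3]

-- A's pair generators expressed as flatMaps over ranges
theorem pv_cwr2_pvR (a b : Int) :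
    pvCwr2 (pvR a b) = (pvR a b).flatMap (fun i => (pvR i b).map (fun j => (i, j))) := by
  by_cases h : b ≤ a
  · simp [pvR_nil h, pvCwr2]
  · push_neg at h
    rw [pvR_cons h]
    simp only [List.flatMap_cons, pvCwr2]
    rw [pv_cwr2_pvR (a + 1) b, ← pvR_cons h]
  termination_by (b - a).toNat
  decreasing_by simp; omega

theorem pv_comb2_pvR (a b : Int) :
    pvComb2 (pvR a b) = (pvR a b).flatMap (fun i => (pvR (i + 1) b).map (fun j => (i, j))) := by
  by_cases h : b ≤ a
  · simp [pvR_nil h, pvComb2]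
  · push_neg at h
    rw [pvR_cons h]
    simp only [List.flatMap_cons, pvComb2]
    rw [pv_comb2_pvR (a + 1) b]
  termination_by (b - a).toNat
  decreasing_by simp; omega

-- range filters
theorem pv_filter_le (a b c : Int) (hcb : c + 1 ≤ b) :
    (pvR a b).filter (fun j => decide (j ≤ c)) = pvR a (c + 1) := by
  by_cases h : b ≤ a
  · rw [pvR_nil h, pvR_nil (by omega)]; rfl
  · push_neg at h
    rw [pvR_cons h]
    by_cases hac : a ≤ c
    · rw [List.filter_cons_of_pos (by simpa), pv_filter_le (a + 1) b c hcb, ← pvR_cons (by omega)]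
    · rw [List.filter_cons_of_neg (by simp; omega), pv_filter_le (a + 1) b c hcb,
        pvR_nil (by omega), pvR_nil (by omega)]
  termination_by (b - a).toNat
  decreasing_by all_goals (simp; omega)

theorem pv_filter_gt (a b c : Int) (hca : c < a) :
    (pvR a b).filter (fun j => decide (¬ j ≤ c)) = pvR a b := by
  apply List.filter_eq_self.mpr
  intro j hj
  have := mem_pvR.mp hj
  simp; omega

-- split a flatMap over 1..n at c: rows above c are empty
theorem pv_flatMap_split {β : Type} (n c : Int) (h1 : 0 ≤ c) (h2 : c ≤ n)
    (g row : Int → List β)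
    (hlo : ∀ i, 1 ≤ i → i ≤ c → g i = row i) (hhi : ∀ i, c < i → g i = []) :
    (pvR 1 (n + 1)).flatMap g = (pvR 1 (c + 1)).flatMap row := by
  rw [show pvR 1 (n + 1) = pvR 1 (c + 1) ++ pvR (c + 1) (n + 1) from
    PySem.List.pyRange_one_append 1 (c + 1) (n + 1) (by omega) (by omega)]
  rw [List.flatMap_append]
  have e1 : (pvR 1 (c + 1)).flatMap g = (pvR 1 (c + 1)).flatMap row :=
    pv_flatMap_congr (fun i hi => by
      have := mem_pvR.mp hi; exact hlo i this.1 (by omega))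
  have e2 : (pvR (c + 1) (n + 1)).flatMap g = [] := by
    rw [pv_flatMap_congr (f := g) (g := fun _ => ([] : List β))
      (fun i hi => by have := mem_pvR.mp hi; exact hhi i (by omega))]
    simp
  rw [e1, e2, List.append_nil]

-- split a flatMap over 1..n at c: rows up to c are empty
theorem pv_flatMap_split' {β : Type} (n c : Int) (h1 : 0 ≤ c) (h2 : c ≤ n)
    (g row : Int → List β)
    (hlo : ∀ i, i ≤ c → g i = []) (hhi : ∀ i, c < i → i ≤ n → g i = row i) :
    (pvR 1 (n + 1)).flatMap g = (pvR (c + 1) (n + 1)).flatMap row := by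
  rw [show pvR 1 (n + 1) = pvR 1 (c + 1) ++ pvR (c + 1) (n + 1) from
    PySem.List.pyRange_one_append 1 (c + 1) (n + 1) (by omega) (by omega)]
  rw [List.flatMap_append]
  have e1 : (pvR 1 (c + 1)).flatMap g = [] := by
    rw [pv_flatMap_congr (f := g) (g := fun _ => ([] : List β))
      (fun i hi => by have := mem_pvR.mp hi; exact hlo i (by omega))]
    simp
  have e2 : (pvR (c + 1) (n + 1)).flatMap g = (pvR (c + 1) (n + 1)).flatMap row :=
    pv_flatMap_congr (fun i hi => by
      have := mem_pvR.mp hi; exact hhi i (by omega) (by omega))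
  rw [e1, e2, List.nil_append]

theorem pv_flatMap_sing {α β : Type} (l : List α) (f : α → β) :
    l.flatMap (fun x => [f x]) = l.map f := by
  induction l with
  | nil => rfl
  | cons x xs ih => simp [List.flatMap_cons, ih]

-- row filters: what each bucket keeps of row i (j runs over i..n)
theorem pv_row1 (n c i : Int) (hi : i < n + 1) :
    ((pvR i (n + 1)).map (fun j => (i, j))).filter (pvQ1 c) =
      if i ≤ c then [(i, i)] else [] := by
  rw [List.filter_map, pvR_cons hi]
  have htail : (pvR (i + 1) (n + 1)).filter ((pvQ1 c) ∘ (fun j => (i, j))) = [] :=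
    List.filter_eq_nil_iff.mpr (fun j hj => by
      have := mem_pvR.mp hj; simp [pvQ1]; omega)
  by_cases h : i ≤ c
  · rw [List.filter_cons_of_pos (by simp [pvQ1]; omega), htail]
    simp [h]
  · rw [List.filter_cons_of_neg (by simp [pvQ1]; omega), htail]
    simp [h]

theorem pv_row2 (n c i : Int) (hi : i < n + 1) (hcn : c ≤ n) :
    ((pvR i (n + 1)).map (fun j => (i, j))).filter (pvQ2 c) =
      (pvR (i + 1) (c + 1)).map (fun j => (i, j)) := by
  rw [List.filter_map, pvR_cons hi]
  rw [List.filter_cons_of_neg (by simp [pvQ2])]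
  congr 1
  have : ((pvQ2 c) ∘ (fun j => (i, j))) = fun j => decide (j ≤ c ∧ ¬ i = j) := by
    funext j; simp [pvQ2]
  rw [this]
  have : (pvR (i + 1) (n + 1)).filter (fun j => decide (j ≤ c ∧ ¬ i = j)) =
      (pvR (i + 1) (n + 1)).filter (fun j => decide (j ≤ c)) := by
    apply List.filter_congr
    intro j hj
    have := mem_pvR.mp hj; simp; omega
  rw [this, pv_filter_le (i + 1) (n + 1) c (by omega)]

theorem pv_row3 (n c i : Int) (hi : i < n + 1) (hic : i ≤ c) (hcn : c ≤ n) :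
    ((pvR i (n + 1)).map (fun j => (i, j))).filter (pvQ3 c) =
      (pvR (c + 1) (n + 1)).map (fun j => (i, j)) := by
  rw [List.filter_map]
  congr 1
  have : ((pvQ3 c) ∘ (fun j => (i, j))) = fun j => decide (¬ j ≤ c) := by
    funext j; simp [pvQ3]; omega
  rw [this]
  rw [show pvR i (n + 1) = pvR i (c + 1) ++ pvR (c + 1) (n + 1) from
    PySem.List.pyRange_one_append i (c + 1) (n + 1) (by omega) (by omega)]
  rw [List.filter_append, pv_filter_gt (c + 1) (n + 1) c (by omega)]
  rw [List.filter_eq_nil_iff.mpr (fun j hj => by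
    have := mem_pvR.mp hj; simp; omega)]
  rfl

theorem pv_row3' (n c i : Int) (hic : c < i) :
    ((pvR i (n + 1)).map (fun j => (i, j))).filter (pvQ3 c) = [] := by
  rw [List.filter_map, List.filter_eq_nil_iff.mpr (fun j hj => by simp [pvQ3]; omega)]
  rfl

theorem pv_row4 (n c i : Int) (hi : i < n + 1) (hic : c < i) :
    ((pvR i (n + 1)).map (fun j => (i, j))).filter (pvQ4 c) = [(i, i)] := by
  rw [List.filter_map, pvR_cons hi]
  rw [List.filter_cons_of_pos (by simp [pvQ4]; omega)]
  rw [List.filter_eq_nil_iff.mpr (fun j hj => by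
    have := mem_pvR.mp hj; simp [pvQ4]; omega)]
  rfl

theorem pv_row4' (n c i : Int) (hic : i ≤ c) :
    ((pvR i (n + 1)).map (fun j => (i, j))).filter (pvQ4 c) = [] := by
  rw [List.filter_map, List.filter_eq_nil_iff.mpr (fun j hj => by simp [pvQ4]; omega)]
  rfl

theorem pv_row5 (n c i : Int) (hi : i < n + 1) (hic : c < i) :
    ((pvR i (n + 1)).map (fun j => (i, j))).filter (pvQ5 c) =
      (pvR (i + 1) (n + 1)).map (fun j => (i, j)) := by
  rw [List.filter_map, pvR_cons hi]
  rw [List.filter_cons_of_neg (by simp [pvQ5])]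
  rw [List.filter_eq_self.mpr (fun j hj => by
    have := mem_pvR.mp hj; simp [pvQ5]; omega)]

theorem pv_row5' (n c i : Int) (hic : i ≤ c) :
    ((pvR i (n + 1)).map (fun j => (i, j))).filter (pvQ5 c) = [] := by
  rw [List.filter_map, List.filter_eq_nil_iff.mpr (fun j hj => by
    have := mem_pvR.mp hj; simp [pvQ5]; omega)]
  rfl

theorem pv_row2' (n c i : Int) (hic : c < i) :
    ((pvR i (n + 1)).map (fun j => (i, j))).filter (pvQ2 c) = [] := by
  rw [List.filter_map, List.filter_eq_nil_iff.mpr (fun j hj => by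
    have := mem_pvR.mp hj; simp [pvQ2]; omega)]
  rfl

-- the five bucket identities (0 ≤ c = n_input ≤ m)
theorem pv_b1 (m c : Int) (hc : 0 ≤ c) (hcm : c ≤ m) :
    (pvAll m).filter (pvQ1 c) = (pvR 1 (c + 1)).map (fun i => (i, i)) := by
  unfold pvAll
  rw [pv_filter_flatMap,
    pv_flatMap_split m c hc hcm _ (fun i => [(i, i)])
      (fun i h1 h2 => by
        rw [pv_row1 m c i (by omega)]; simp [h2])
      (fun i h => by
        by_cases hi : i < m + 1
        · rw [pv_row1 m c i hi, if_neg (by omega)]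
        · rw [pvR_nil (by omega)]; rfl)]
  exact pv_flatMap_sing _ _

theorem pv_b2 (m c : Int) (hc : 0 ≤ c) (hcm : c ≤ m) :
    (pvAll m).filter (pvQ2 c) = pvComb2 (pvR 1 (c + 1)) := by
  unfold pvAll
  rw [pv_filter_flatMap,
    pv_flatMap_split m c hc hcm _
      (fun i => (pvR (i + 1) (c + 1)).map (fun j => (i, j)))
      (fun i h1 h2 => pv_row2 m c i (by omega) hcm)
      (fun i h => pv_row2' m c i h),
    pv_comb2_pvR 1 (c + 1)]

theorem pv_b3 (m c : Int) (hc : 0 ≤ c) (hcm : c ≤ m) :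
    (pvAll m).filter (pvQ3 c) = pvProd2 (pvR 1 (c + 1)) (pvR (c + 1) (m + 1)) := by
  unfold pvAll
  rw [pv_filter_flatMap,
    pv_flatMap_split m c hc hcm _
      (fun i => (pvR (c + 1) (m + 1)).map (fun j => (i, j)))
      (fun i h1 h2 => pv_row3 m c i (by omega) h2 hcm)
      (fun i h => pv_row3' m c i h)]
  rfl

theorem pv_b4 (m c : Int) (hc : 0 ≤ c) (hcm : c ≤ m) :
    (pvAll m).filter (pvQ4 c) = (pvR (c + 1) (m + 1)).map (fun i => (i, i)) := by
  unfold pvAll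
  rw [pv_filter_flatMap,
    pv_flatMap_split' m c hc hcm _ (fun i => [(i, i)])
      (fun i h => pv_row4' m c i h)
      (fun i h1 h2 => pv_row4 m c i (by omega) h1)]
  exact pv_flatMap_sing _ _

theorem pv_b5 (m c : Int) (hc : 0 ≤ c) (hcm : c ≤ m) :
    (pvAll m).filter (pvQ5 c) = pvComb2 (pvR (c + 1) (m + 1)) := by
  unfold pvAll
  rw [pv_filter_flatMap,
    pv_flatMap_split' m c hc hcm _
      (fun i => (pvR (i + 1) (m + 1)).map (fun j => (i, j)))
      (fun i h => pv_row5' m c i h)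
      (fun i h1 h2 => pv_row5 m c i (by omega) h1),
    ← pv_comb2_pvR (c + 1) (m + 1)]

-- the whole else-branch of B, at the pair level
theorem pv_alt_else (m c : Int) :
    make_Kij_names_alt m c false =
      ((pvAll m).filter (pvQ1 c)).map pvF ++ ((pvAll m).filter (pvQ2 c)).map pvF
      ++ ((pvAll m).filter (pvQ3 c)).map pvF ++ ((pvAll m).filter (pvQ4 c)).map pvF
      ++ ((pvAll m).filter (pvQ5 c)).map pvF := by
  unfold make_Kij_names_alt
  rw [if_neg (by simp)]
  have hnest : (PySem.List.pyRange 1 (m + 1) 1).foldl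
      (fun s i => (PySem.List.pyRange i (m + 1) 1).foldl (fun s j => pvStep c s i j) s)
      (([], [], [], [], []) : List String × List String × List String × List String × List String) =
      (pvAll m).foldl (fun s p => pvStep c s p.1 p.2) ([], [], [], [], []) := by
    rw [pvAll, pv_foldl_flatMap]
    rw [show (fun (s : List String × List String × List String × List String × List String)
          (i : Int) => ((pvR i (m + 1)).map (fun j => (i, j))).foldl
            (fun s p => pvStep c s p.1 p.2) s) =
        (fun s i => (pvR i (m + 1)).foldl (fun s j => pvStep c s i j) s) from by
      funext s i; rw [List.foldl_map]]
    rfl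
  dsimp only
  rw [hnest, pv_foldl5]
  simp

-- both sides are empty when m < 1 (unordered branch, 0 ≤ c, ¬D forces c = 0 there)
theorem pv_both_nil (m c : Int) (hm : m < 1) (hc : c = 0) :
    make_Kij_names m c false = make_Kij_names_alt m c false := by
  subst hc
  unfold make_Kij_names make_Kij_names_alt
  rw [if_neg (by simp), if_neg (by simp)]
  rw [show PySem.List.pyRange 1 (0 + 1) 1 = pvR 1 1 from rfl, pvR_nil (by omega)]
  rw [show PySem.List.pyRange (0 + 1) (0 + (m - 0) + 1) 1 = pvR 1 (m + 1) from by norm_num; rfl,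
    pvR_nil (by omega)]
  rw [show PySem.List.pyRange 1 (m + 1) 1 = pvR 1 (m + 1) from rfl, pvR_nil (by omega)]
  simp [pvCwr2, pvComb2, pvProd2]

-- ===== VERDICT (by name: the statement is the Claim_ definition above) =====
theorem make_Kij_names_spec : Claim_unchanged_make_Kij_names := by
  intro m c r hdom hpre
  unfold Spec_make_Kij_names
  intro hD
  cases r with
  | true =>
    show make_Kij_names m c true = make_Kij_names_alt m c true
    unfold make_Kij_names make_Kij_names_alt
    rw [if_pos rfl, if_pos rfl]
    rw [show PySem.List.pyRange 1 (m + 1) 1 = pvR 1 (m + 1) from rfl, pv_cwr2_pvR 1 (m + 1)]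
    simp [List.map_flatMap, List.map_map, Function.comp_def, pvR]
  | false =>
    have hc0 : 0 ≤ c := by
      rcases hpre with h | h
      · exact absurd h (by simp)
      · exact h
    unfold D_make_Kij_names at hD
    by_cases hcm : c ≤ m
    case neg =>
      -- ¬D and m < c force c = 0, m < 1: both branches produce []
      have h1 : ¬ (1 ≤ c) := fun h => hD ⟨rfl, h, by omega⟩
      exact pv_both_nil m c (by omega) (by omega)
    have hc : 0 ≤ c ∧ c ≤ m := ⟨hc0, hcm⟩
    show make_Kij_names m c false = make_Kij_names_alt m c false
    rw [pv_alt_else m c, pv_b1 m c hc.1 hc.2, pv_b2 m c hc.1 hc.2, pv_b3 m c hc.1 hc.2,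
      pv_b4 m c hc.1 hc.2, pv_b5 m c hc.1 hc.2]
    unfold make_Kij_names
    rw [if_neg (by simp)]
    rw [show c + (m - c) + 1 = m + 1 from by ring,
      show pvF = (fun p : Int × Int => pvName p.1 p.2) from rfl]
    simp [List.map_map, Function.comp_def, pvR]

theorem make_Kij_names_changed : Claim_changed_make_Kij_names := by
  unfold Claim_changed_make_Kij_names; decide
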